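-- pv_equiv track=rewrite | github.com/JiangLu-CS/Dynamic-Network-Analysis | function.py | SetOfInfluence
-- ===== SOURCE A (Python) =====
-- def GetStronglyConnectedNode(ContactSequence):
--     StronglyConnectedNode = []
--     for i in range(len(ContactSequence)):
--         tmplist = set()
--         tmplist.add(ContactSequence[i][0])
--         tmplist.add(ContactSequence[i][1])
--         if tmplist not in StronglyConnectedNode:
--             StronglyConnectedNode.append(tmplist)
--     return StronglyConnectedNode
--
-- def GetWeaklyConnectedNode(ContactSequence):
--     WeaklyConnectedNode = []
--     for i in range(len(ContactSequence)):
--         for j in range(i, len(ContactSequence)):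
--             if ContactSequence[i][1] == ContactSequence[j][0]:
--                 tmplist = []
--                 tmplist.append(ContactSequence[i][0])
--                 tmplist.append(ContactSequence[j][1])
--                 if tmplist not in WeaklyConnectedNode:
--                     WeaklyConnectedNode.append(tmplist)
--     return WeaklyConnectedNode
--
-- def SetOfInfluence(n, ContactSequence):
--     SetOfInfluence = set()
--     StronglyConnectedNode = GetStronglyConnectedNode(ContactSequence)
--     WeaklyConnectedNode = GetWeaklyConnectedNode(ContactSequence)
--     for i in range(len(StronglyConnectedNode)):
--         if n in StronglyConnectedNode[i]:
--             for source in StronglyConnectedNode[i]: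
--                 SetOfInfluence.add(source)
--     for i in range(len(WeaklyConnectedNode)):
--         tmplist = []
--         tmplist.append(n)
--         tmplist.append(WeaklyConnectedNode[i][1])
--         if tmplist in WeaklyConnectedNode:
--             SetOfInfluence.add(WeaklyConnectedNode[i][1])
--     return SetOfInfluence
-- ===== SOURCE B (Python) =====
-- def SetOfInfluence(n, ContactSequence):
--     influence = set()
--     for contact in ContactSequence:
--         a, b = contact[0], contact[1]
--         if n == a or n == b:
--             influence.add(a)
--             influence.add(b)
--     # nodes reachable in two hops: a contact links onward when its head was
--     # already seen as the tail of a contact starting at n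
--     middles = set()
--     for contact in ContactSequence:
--         a, b = contact[0], contact[1]
--         if a == n:
--             middles.add(b)
--         if a in middles:
--             influence.add(b)
--     return influence
-- ===== Notes on version B (the rewrite author's own statement) =====
-- stated objective: faster
-- what changed: Replaces A's quadratic construction of a deduplicated 'weakly connected pair' list (with O(|list|) list-membership scans per candidate) by two linear passes over the contacts using sets: one collecting endpoints of contacts touching n, one collecting tails of contacts whose head was already reached from n; Pre_ excludes only contacts with fewer than two entries, on which A raises IndexError.
import Mathlib
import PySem

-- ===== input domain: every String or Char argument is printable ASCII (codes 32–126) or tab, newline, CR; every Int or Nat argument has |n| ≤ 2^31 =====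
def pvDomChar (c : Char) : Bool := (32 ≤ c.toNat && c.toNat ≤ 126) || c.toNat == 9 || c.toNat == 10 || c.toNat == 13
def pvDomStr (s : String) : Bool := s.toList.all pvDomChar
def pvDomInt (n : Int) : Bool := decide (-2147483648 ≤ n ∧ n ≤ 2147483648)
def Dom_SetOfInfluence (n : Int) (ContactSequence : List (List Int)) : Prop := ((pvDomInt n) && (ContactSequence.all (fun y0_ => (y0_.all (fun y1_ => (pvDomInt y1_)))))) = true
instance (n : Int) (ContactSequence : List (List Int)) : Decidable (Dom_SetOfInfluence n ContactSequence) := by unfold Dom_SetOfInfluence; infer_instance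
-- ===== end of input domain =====

-- ===== PORT A =====
-- B replaces A's quadratic deduplicated weak-pair list and its repeated list scans by two
-- linear passes with sets (endpoints of contacts touching n; tails of contacts whose head was
-- already reached from n); measured much faster on large inputs.
-- Both functions return a Python SET, whose iteration order is not observable: each port
-- returns the set's elements in sorted order as the canonical List representation (exact as a
-- finite set, which is how set results are compared).

-- contact[0] / contact[1]; the total pyGetD is sound because Pre_ requires every contact to have >= 2 entries
def pvHd (c : List Int) : Int := PySem.List.pyGetD c 0 0
def pvTl (c : List Int) : Int := PySem.List.pyGetD c 1 0

-- GetStronglyConnectedNode: list of 2-element sets, deduplicated by set equality (Python `in` on sets)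
def SOIStrong (ContactSequence : List (List Int)) : List (PySem.Set Int) :=
  (PySem.List.pyRange 0 (PySem.List.len ContactSequence) 1).foldl (fun acc i =>
    let c := PySem.List.pyGetD ContactSequence i []
    let t := PySem.Set.add (PySem.Set.add PySem.Set.empty (pvHd c)) (pvTl c)
    if acc.any (fun s => PySem.Set.equal s t) then acc else acc ++ [t]) []

-- GetWeaklyConnectedNode: nested i <= j loops, list deduplication by list equality
def SOIWeak (ContactSequence : List (List Int)) : List (List Int) :=
  (PySem.List.pyRange 0 (PySem.List.len ContactSequence) 1).foldl (fun acc i =>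
    (PySem.List.pyRange i (PySem.List.len ContactSequence) 1).foldl (fun acc2 j =>
      if pvTl (PySem.List.pyGetD ContactSequence i []) = pvHd (PySem.List.pyGetD ContactSequence j []) then
        let t := [pvHd (PySem.List.pyGetD ContactSequence i []), pvTl (PySem.List.pyGetD ContactSequence j [])]
        if t ∈ acc2 then acc2 else acc2 ++ [t]
      else acc2) acc) []

def SetOfInfluence (n : Int) (ContactSequence : List (List Int)) : List Int :=
  let strong := SOIStrong ContactSequence
  let weak := SOIWeak ContactSequence
  -- first loop: every strongly connected set containing n is poured into the result set
  let s1 : PySem.Set Int := strong.foldl (fun acc s =>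
    if PySem.Set.contains s n then PySem.Set.update acc s else acc) PySem.Set.empty
  -- second loop: w[1] is added when [n, w[1]] is itself a weak pair
  let res : PySem.Set Int := weak.foldl (fun acc w =>
    if [n, pvTl w] ∈ weak then PySem.Set.add acc (pvTl w) else acc) s1
  PySem.List.sorted res (fun x => x) false

-- ===== PORT B =====
-- second loop of Source B: state = (middles, influence)
def SOIAltScan (n : Int) (ContactSequence : List (List Int)) (influence : PySem.Set Int) :
    PySem.Set Int × PySem.Set Int :=
  ContactSequence.foldl (fun p c =>
    let mids := if pvHd c = n then PySem.Set.add p.1 (pvTl c) else p.1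
    (mids, if PySem.Set.contains mids (pvHd c) then PySem.Set.add p.2 (pvTl c) else p.2))
  (PySem.Set.empty, influence)

def SetOfInfluence_alt (n : Int) (ContactSequence : List (List Int)) : List Int :=
  -- first loop of Source B: endpoints of contacts touching n
  let influence := ContactSequence.foldl (fun res c =>
    if n = pvHd c ∨ n = pvTl c then PySem.Set.add (PySem.Set.add res (pvHd c)) (pvTl c) else res)
    PySem.Set.empty
  PySem.List.sorted (SOIAltScan n ContactSequence influence).2 (fun x => x) false

-- ===== PRECONDITION & SPEC =====
-- Pre_ excludes exactly the inputs where Python A raises IndexError: a contact with fewer than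
-- two entries (A reads contact[0] and contact[1]); B raises there too.
def Pre_SetOfInfluence (n : Int) (ContactSequence : List (List Int)) : Prop :=
  ∀ c ∈ ContactSequence, 2 ≤ c.length
instance (n : Int) (ContactSequence : List (List Int)) : Decidable (Pre_SetOfInfluence n ContactSequence) := by
  unfold Pre_SetOfInfluence; infer_instance
def pvWitness_SetOfInfluence : Int × List (List Int) := (1, [[1, 2], [2, 3]])
def Spec_SetOfInfluence (n : Int) (ContactSequence : List (List Int)) (out : List Int) : Prop := out = SetOfInfluence_alt n ContactSequence
instance (n : Int) (ContactSequence : List (List Int)) (out : List Int) : Decidable (Spec_SetOfInfluence n ContactSequence out) := by unfold Spec_SetOfInfluence; infer_instance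

-- ===== CLAIM (what is proved, stated in full; the proofs are below) =====
def Claim_equal_SetOfInfluence : Prop := ∀ (n : Int) (ContactSequence : List (List Int)), Dom_SetOfInfluence n ContactSequence → Pre_SetOfInfluence n ContactSequence → Spec_SetOfInfluence n ContactSequence (SetOfInfluence n ContactSequence)

-- ===== LEMMAS AND PROOFS =====

-- ---- proof-side abbreviations ----

-- the per-contact strong insertion stream
def pvGS (n : Int) (c : List Int) : List Int :=
  if n = pvHd c ∨ n = pvTl c then [pvHd c, pvTl c] else []

-- A's 2-element set for a contact
def pvSetOfC (c : List Int) : PySem.Set Int :=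
  PySem.Set.add (PySem.Set.add PySem.Set.empty (pvHd c)) (pvTl c)

-- A's strong-list building step
def pvStepS (S : List (PySem.Set Int)) (c : List Int) : List (PySem.Set Int) :=
  if S.any (fun s => PySem.Set.equal s (pvSetOfC c)) then S else S ++ [pvSetOfC c]

-- A's strong-phase pour function
def pvHS (n : Int) (s : PySem.Set Int) : List Int :=
  if PySem.Set.contains s n then s else []

-- A's weak candidate-pair stream (before deduplication)
def pvPA (CS : List (List Int)) : List (List Int) :=
  (PySem.List.pyRange 0 (PySem.List.len CS) 1).flatMap (fun i =>
    (CS.drop i.toNat).flatMap (fun c' =>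
      if pvTl (PySem.List.pyGetD CS i []) = pvHd c'
      then [[pvHd (PySem.List.pyGetD CS i []), pvTl c']] else []))

-- two-hop reachability from n along an index-ordered linked pair
def pvRsp (n : Int) (CS : List (List Int)) (d : Int) : Prop :=
  ∃ i j : Nat, i ≤ j ∧ j < CS.length ∧ pvHd (CS.getD i []) = n ∧
    pvTl (CS.getD i []) = pvHd (CS.getD j []) ∧ pvTl (CS.getD j []) = d

-- middles spec
def pvMsp (n : Int) (CS : List (List Int)) (x : Int) : Prop :=
  ∃ j : Nat, j < CS.length ∧ pvHd (CS.getD j []) = n ∧ pvTl (CS.getD j []) = x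

-- the common base set poured by the strong phase of both ports
def pvBase (n : Int) (CS : List (List Int)) : PySem.Set Int :=
  PySem.Set.ofList (CS.flatMap (pvGS n))

-- ---- generic set-update lemmas ----

theorem pvUpdateOfSubset {α : Type} [BEq α] [LawfulBEq α] (s : PySem.Set α) (l : List α)
    (h : ∀ y ∈ l, y ∈ s) : PySem.Set.update s l = s := by
  rw [PySem.Set.update_eq_append_filter]
  have hf : List.filter (fun y => !s.contains y) (PySem.Set.ofList l) = [] := by
    apply List.filter_eq_nil_iff.mpr
    intro y hy
    have hyl : y ∈ l := (PySem.Set.mem_ofList l y).mp hy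
    simp
    exact h y hyl
  rw [hf, List.append_nil]

theorem pvUpdateOne {α : Type} [BEq α] (s : PySem.Set α) (a : α) :
    PySem.Set.update s [a] = PySem.Set.add s a := rfl

theorem pvUpdateTwo {α : Type} [BEq α] (s : PySem.Set α) (a b : α) :
    PySem.Set.update s [a, b] = PySem.Set.add (PySem.Set.add s a) b := rfl

theorem pvFoldlUpdate {α β : Type} [BEq β] (l : List α) (g : α → List β) (s : PySem.Set β) :
    l.foldl (fun acc x => PySem.Set.update acc (g x)) s = PySem.Set.update s (l.flatMap g) := by
  induction l generalizing s with
  | nil => rfl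
  | cons c l ih => simp only [List.foldl_cons, List.flatMap_cons, ih, PySem.Set.update_append]

-- membership and Nodup of a conditional-add loop
theorem pvMemFoldlCondAdd {α β : Type} [BEq β] [LawfulBEq β] (l : List α) (P : α → Prop)
    [DecidablePred P] (f : α → β) (s : PySem.Set β) (y : β) :
    y ∈ l.foldl (fun acc w => if P w then PySem.Set.add acc (f w) else acc) s ↔
      y ∈ s ∨ ∃ w ∈ l, P w ∧ y = f w := by
  induction l generalizing s with
  | nil => simp
  | cons c l ih =>
    simp only [List.foldl_cons, List.mem_cons, ih]
    by_cases hc : P c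
    · rw [if_pos hc, PySem.Set.mem_add]
      constructor
      · rintro (⟨h | h⟩ | h)
        · exact Or.inl h
        · exact Or.inr ⟨c, Or.inl rfl, hc, h⟩
        · obtain ⟨w, hw, hP, hy⟩ := h
          exact Or.inr ⟨w, Or.inr hw, hP, hy⟩
      · rintro (h | ⟨w, (rfl | hw), hP, hy⟩)
        · exact Or.inl (Or.inl h)
        · exact Or.inl (Or.inr hy)
        · exact Or.inr ⟨w, hw, hP, hy⟩
    · rw [if_neg hc]
      constructor
      · rintro (h | ⟨w, hw, hP, hy⟩)
        · exact Or.inl h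
        · exact Or.inr ⟨w, Or.inr hw, hP, hy⟩
      · rintro (h | ⟨w, (rfl | hw), hP, hy⟩)
        · exact Or.inl h
        · exact absurd hP hc
        · exact Or.inr ⟨w, hw, hP, hy⟩

theorem pvNodupFoldlCondAdd {α β : Type} [BEq β] [LawfulBEq β] (l : List α) (P : α → Prop)
    [DecidablePred P] (f : α → β) (s : PySem.Set β) (hs : s.Nodup) :
    (l.foldl (fun acc w => if P w then PySem.Set.add acc (f w) else acc) s).Nodup := by
  induction l generalizing s with
  | nil => exact hs
  | cons c l ih =>
    simp only [List.foldl_cons]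
    by_cases hc : P c
    · rw [if_pos hc]
      exact ih _ (PySem.Set.nodup_add _ _ hs)
    · rw [if_neg hc]
      exact ih _ hs

-- ---- strong phase: both ports pour the same set pvBase ----

theorem pvMemSetOfC (c : List Int) (x : Int) : x ∈ pvSetOfC c ↔ x = pvHd c ∨ x = pvTl c := by
  simp [pvSetOfC, PySem.Set.mem_add, PySem.Set.empty]

theorem pvSOIStrongEq (CS : List (List Int)) : SOIStrong CS = CS.foldl pvStepS [] := by
  unfold SOIStrong
  exact (PySem.List.foldl_pyRange_pyGetD CS [] pvStepS [] le_rfl).trans (by simp)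

theorem pvStrongKey (n : Int) (S : List (PySem.Set Int)) (c : List Int) :
    PySem.Set.ofList ((pvStepS S c).flatMap (pvHS n)) =
    PySem.Set.update (PySem.Set.ofList (S.flatMap (pvHS n))) (pvGS n c) := by
  unfold pvStepS
  by_cases hdup : S.any (fun s => PySem.Set.equal s (pvSetOfC c))
  · rw [if_pos hdup]
    obtain ⟨s, hs, hse⟩ := List.any_eq_true.mp hdup
    have hmem : ∀ x, x ∈ s ↔ x ∈ pvSetOfC c := (PySem.Set.equal_iff s (pvSetOfC c)).mp hse
    symm
    unfold pvGS
    by_cases hn : n = pvHd c ∨ n = pvTl c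
    · rw [if_pos hn]
      apply pvUpdateOfSubset
      have hns : n ∈ s := (hmem n).mpr ((pvMemSetOfC c n).mpr hn)
      have hss : pvHS n s = s := by unfold pvHS; rw [if_pos ((PySem.Set.contains_iff s n).mpr hns)]
      intro y hy
      apply (PySem.Set.mem_ofList _ y).mpr
      apply List.mem_flatMap.mpr
      refine ⟨s, hs, ?_⟩
      rw [hss]
      apply (hmem y).mpr
      apply (pvMemSetOfC c y).mpr
      simpa using hy
    · rw [if_neg hn]
      rfl
  · rw [if_neg hdup, List.flatMap_append, PySem.Set.ofList_append]
    simp only [List.flatMap_cons, List.flatMap_nil, List.append_nil]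
    unfold pvHS pvGS
    by_cases hn : n = pvHd c ∨ n = pvTl c
    · rw [if_pos ((PySem.Set.contains_iff _ n).mpr ((pvMemSetOfC c n).mpr hn)), if_pos hn]
      by_cases he : pvTl c = pvHd c
      · have hset : pvSetOfC c = [pvHd c] := by
          unfold pvSetOfC
          rw [show PySem.Set.add PySem.Set.empty (pvHd c) = [pvHd c] from rfl, PySem.Set.add_eq_ite]
          simp [he]
        rw [hset, pvUpdateOne, pvUpdateTwo, he]
        exact (PySem.Set.add_of_mem ((PySem.Set.mem_add _ _ _).mpr (Or.inr rfl))).symm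
      · have hset : pvSetOfC c = [pvHd c, pvTl c] := by
          unfold pvSetOfC
          rw [show PySem.Set.add PySem.Set.empty (pvHd c) = [pvHd c] from rfl, PySem.Set.add_eq_ite]
          simp [he]
        rw [hset]
    · rw [if_neg (fun hc => hn ((pvMemSetOfC c n).mp ((PySem.Set.contains_iff _ n).mp hc))), if_neg hn]

theorem pvStrongChar (n : Int) (l : List (List Int)) (S : List (PySem.Set Int)) :
    PySem.Set.ofList ((l.foldl pvStepS S).flatMap (pvHS n)) =
    PySem.Set.update (PySem.Set.ofList (S.flatMap (pvHS n))) (l.flatMap (pvGS n)) := by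
  induction l generalizing S with
  | nil => simp
  | cons c l ih =>
    simp only [List.foldl_cons, List.flatMap_cons]
    rw [ih, pvStrongKey, PySem.Set.update_append]

-- A's strong accumulator is pvBase
theorem pvBaseAEq (n : Int) (CS : List (List Int)) :
    (SOIStrong CS).foldl (fun acc s =>
      if PySem.Set.contains s n then PySem.Set.update acc s else acc) PySem.Set.empty =
    pvBase n CS := by
  refine (PySem.List.foldl_congr_mem _ _
      (fun acc s => PySem.Set.update acc (pvHS n s)) _ ?_).trans ?_
  · intro acc x _
    beta_reduce
    unfold pvHS
    by_cases hc : PySem.Set.contains x n = true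
    · rw [if_pos hc, if_pos hc]
    · rw [if_neg hc, if_neg hc]
      rfl
  · rw [pvFoldlUpdate, pvSOIStrongEq, PySem.Set.update_empty, pvStrongChar]
    simp only [List.flatMap_nil, PySem.Set.ofList_nil, PySem.Set.update_nil_left]
    rfl

-- B's first loop is pvBase
theorem pvBaseBEq (n : Int) (CS : List (List Int)) :
    CS.foldl (fun res c =>
      if n = pvHd c ∨ n = pvTl c then PySem.Set.add (PySem.Set.add res (pvHd c)) (pvTl c) else res)
      PySem.Set.empty = pvBase n CS := by
  refine (PySem.List.foldl_congr_mem _ _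
      (fun res c => PySem.Set.update res (pvGS n c)) _ ?_).trans ?_
  · intro acc c _
    beta_reduce
    unfold pvGS
    by_cases h : n = pvHd c ∨ n = pvTl c
    · rw [if_pos h, if_pos h, pvUpdateTwo]
    · rw [if_neg h, if_neg h]
      rfl
  · rw [pvFoldlUpdate, PySem.Set.update_empty]
    rfl

-- ---- weak phase: port A side ----

theorem pvSOIWeakEq (CS : List (List Int)) : SOIWeak CS = PySem.Set.ofList (pvPA CS) := by
  unfold SOIWeak
  refine (PySem.List.foldl_congr_mem _ _
      (fun acc i => PySem.Set.update acc ((CS.drop i.toNat).flatMap (fun c' =>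
        if pvTl (PySem.List.pyGetD CS i []) = pvHd c'
        then [[pvHd (PySem.List.pyGetD CS i []), pvTl c']] else []))) [] ?_).trans ?_
  · intro acc i hi
    have h0 : 0 ≤ i := (PySem.List.mem_pyRange_one.mp hi).1
    refine ((PySem.List.foldl_pyRange_pyGetD CS []
        (fun acc2 c' => if pvTl (PySem.List.pyGetD CS i []) = pvHd c' then
            (if [pvHd (PySem.List.pyGetD CS i []), pvTl c'] ∈ acc2 then acc2
             else acc2 ++ [[pvHd (PySem.List.pyGetD CS i []), pvTl c']]) else acc2) acc h0).trans ?_)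
    refine (PySem.List.foldl_congr_mem _ _
        (fun acc2 c' => PySem.Set.update acc2 (if pvTl (PySem.List.pyGetD CS i []) = pvHd c'
          then [[pvHd (PySem.List.pyGetD CS i []), pvTl c']] else [])) acc ?_).trans ?_
    · intro acc2 c' _
      by_cases hc : pvTl (PySem.List.pyGetD CS i []) = pvHd c'
      · simp only [if_pos hc, pvUpdateOne, PySem.Set.add_eq_ite]
      · simp only [if_neg hc]
        rfl
    · exact pvFoldlUpdate _ _ acc
  · rw [pvFoldlUpdate, PySem.Set.update_nil_left]
    unfold pvPA
    rfl

theorem pvMemPA (n : Int) (CS : List (List Int)) (d : Int) :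
    [n, d] ∈ pvPA CS ↔ pvRsp n CS d := by
  unfold pvPA pvRsp
  simp only [List.mem_flatMap, PySem.List.mem_pyRange_one, PySem.List.len_eq]
  constructor
  · rintro ⟨i, ⟨hi0, hiL⟩, c', hc', hmem⟩
    rw [PySem.List.pyGetD_eq_getElem CS [] hi0 hiL] at hmem
    split_ifs at hmem with hcond
    · simp only [List.mem_singleton, List.cons.injEq] at hmem
      obtain ⟨hn, hd⟩ : n = pvHd CS[i.toNat] ∧ d = pvTl c' := by tauto
      obtain ⟨k, hk, hck⟩ := List.mem_iff_getElem.mp hc'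
      rw [List.getElem_drop] at hck
      have hklen : i.toNat + k < CS.length := by
        simp only [List.length_drop] at hk
        omega
      refine ⟨i.toNat, i.toNat + k, by omega, hklen, ?_, ?_, ?_⟩
      · rw [List.getD_eq_getElem CS [] (by omega : i.toNat < CS.length)]
        exact hn.symm
      · rw [List.getD_eq_getElem CS [] (by omega : i.toNat < CS.length),
          List.getD_eq_getElem CS [] hklen, hck]
        exact hcond
      · rw [List.getD_eq_getElem CS [] hklen, hck]
        exact hd.symm
    · cases hmem
  · rintro ⟨I, J, hIJ, hJ, h1, h2, h3⟩
    have hIL : I < CS.length := by omega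
    refine ⟨(I : Int), ⟨by omega, by exact_mod_cast hIL⟩, CS[J], ?_, ?_⟩
    · apply List.mem_iff_getElem.mpr
      refine ⟨J - I, ?_, ?_⟩
      · simp only [List.length_drop, Int.toNat_natCast]
        omega
      · rw [List.getElem_drop]
        have hidx : (I : Int).toNat + (J - I) = J := by
          simp only [Int.toNat_natCast]
          omega
        exact getElem_congr rfl hidx (by omega)
    · rw [PySem.List.pyGetD_eq_getElem CS [] (by omega) (by exact_mod_cast hIL)]
      simp only [Int.toNat_natCast]
      rw [List.getD_eq_getElem CS [] hIL] at h1 h2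
      rw [List.getD_eq_getElem CS [] hJ] at h2 h3
      rw [if_pos h2]
      simp [h1, h3]

theorem pvTlPair (a b : Int) : pvTl [a, b] = b := rfl

-- membership in A's result set (before sorting)
theorem pvMemA (n : Int) (CS : List (List Int)) (x : Int) :
    x ∈ (SOIWeak CS).foldl (fun acc w =>
        if [n, pvTl w] ∈ SOIWeak CS then PySem.Set.add acc (pvTl w) else acc)
      ((SOIStrong CS).foldl (fun acc s =>
        if PySem.Set.contains s n then PySem.Set.update acc s else acc) PySem.Set.empty) ↔
    x ∈ pvBase n CS ∨ pvRsp n CS x := by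
  rw [pvBaseAEq, pvMemFoldlCondAdd (SOIWeak CS) (fun w => [n, pvTl w] ∈ SOIWeak CS) pvTl]
  constructor
  · rintro (h | ⟨w, _, hP, rfl⟩)
    · exact Or.inl h
    · rw [pvSOIWeakEq, PySem.Set.mem_ofList, pvMemPA] at hP
      exact Or.inr hP
  · rintro (h | h)
    · exact Or.inl h
    · have hm : [n, x] ∈ SOIWeak CS := by
        rw [pvSOIWeakEq, PySem.Set.mem_ofList]
        exact (pvMemPA n CS x).mpr h
      exact Or.inr ⟨[n, x], hm, hm, (pvTlPair n x).symm⟩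

-- ---- weak phase: port B side ----

theorem pvGetDAppLt {α : Type} [Inhabited α] (l : List α) (c : α) (dv : α) (j : Nat) (h : j < l.length) :
    (l ++ [c]).getD j dv = l.getD j dv := by
  unfold List.getD
  rw [List.getElem?_append_left h]

theorem pvGetDAppSelf {α : Type} [Inhabited α] (l : List α) (c : α) (dv : α) :
    (l ++ [c]).getD l.length dv = c := by
  unfold List.getD
  rw [List.getElem?_append_right le_rfl]
  simp

theorem pvMspApp (n : Int) (l : List (List Int)) (c : List Int) (x : Int) :
    pvMsp n (l ++ [c]) x ↔ pvMsp n l x ∨ (pvHd c = n ∧ pvTl c = x) := by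
  unfold pvMsp
  constructor
  · rintro ⟨j, hj, h1, h2⟩
    simp only [List.length_append, List.length_cons, List.length_nil] at hj
    by_cases hjl : j < l.length
    · rw [pvGetDAppLt l c [] j hjl] at h1 h2
      exact Or.inl ⟨j, hjl, h1, h2⟩
    · have : j = l.length := by omega
      rw [this, pvGetDAppSelf] at h1 h2
      exact Or.inr ⟨h1, h2⟩
  · rintro (⟨j, hj, h1, h2⟩ | ⟨h1, h2⟩)
    · exact ⟨j, by simp; omega, by rw [pvGetDAppLt l c [] j hj]; exact h1,
        by rw [pvGetDAppLt l c [] j hj]; exact h2⟩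
    · exact ⟨l.length, by simp, by rw [pvGetDAppSelf]; exact h1, by rw [pvGetDAppSelf]; exact h2⟩

theorem pvRspApp (n : Int) (l : List (List Int)) (c : List Int) (d : Int) :
    pvRsp n (l ++ [c]) d ↔ pvRsp n l d ∨ (pvMsp n (l ++ [c]) (pvHd c) ∧ pvTl c = d) := by
  unfold pvRsp pvMsp
  constructor
  · rintro ⟨i, j, hij, hj, h1, h2, h3⟩
    simp only [List.length_append, List.length_cons, List.length_nil] at hj
    by_cases hjl : j < l.length
    · rw [pvGetDAppLt l c [] j hjl] at h2 h3
      rw [pvGetDAppLt l c [] i (by omega)] at h1 h2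
      exact Or.inl ⟨i, j, hij, hjl, h1, h2, h3⟩
    · have hje : j = l.length := by omega
      rw [hje, pvGetDAppSelf] at h2 h3
      refine Or.inr ⟨⟨i, by simp; omega, h1, h2⟩, h3⟩
  · rintro (⟨i, j, hij, hj, h1, h2, h3⟩ | ⟨⟨i, hi, h1, h2⟩, h3⟩)
    · refine ⟨i, j, hij, by simp; omega, ?_, ?_, ?_⟩
      · rw [pvGetDAppLt l c [] i (by omega)]; exact h1
      · rw [pvGetDAppLt l c [] i (by omega), pvGetDAppLt l c [] j hj]; exact h2
      · rw [pvGetDAppLt l c [] j hj]; exact h3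
    · simp only [List.length_append, List.length_cons, List.length_nil] at hi
      refine ⟨i, l.length, by omega, by simp, h1, ?_, ?_⟩
      · rw [pvGetDAppSelf]; exact h2
      · rw [pvGetDAppSelf]; exact h3

theorem pvScanStep (n : Int) (l : List (List Int)) (c : List Int) (init : PySem.Set Int) :
    SOIAltScan n (l ++ [c]) init =
      (let st := SOIAltScan n l init
       let mids := if pvHd c = n then PySem.Set.add st.1 (pvTl c) else st.1
       (mids, if PySem.Set.contains mids (pvHd c) then PySem.Set.add st.2 (pvTl c) else st.2)) := by
  unfold SOIAltScan
  rw [List.foldl_append]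
  simp

theorem pvScanMids (n : Int) (CS : List (List Int)) (init : PySem.Set Int) (x : Int) :
    x ∈ (SOIAltScan n CS init).1 ↔ pvMsp n CS x := by
  induction CS using List.reverseRecOn with
  | nil =>
    simp only [SOIAltScan, List.foldl_nil, pvMsp]
    constructor
    · intro h
      simp [PySem.Set.empty] at h
    · rintro ⟨j, hj, -⟩
      simp at hj
  | append_singleton l c ih =>
    rw [pvScanStep, pvMspApp]
    simp only []
    by_cases hc : pvHd c = n
    · rw [if_pos hc, PySem.Set.mem_add, ih]
      constructor
      · rintro (h | h)
        · exact Or.inl h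
        · exact Or.inr ⟨hc, h.symm⟩
      · rintro (h | ⟨-, h⟩)
        · exact Or.inl h
        · exact Or.inr h.symm
    · rw [if_neg hc, ih]
      constructor
      · exact Or.inl
      · rintro (h | ⟨h1, -⟩)
        · exact h
        · exact absurd h1 hc

theorem pvScanTwo (n : Int) (CS : List (List Int)) (init : PySem.Set Int) (d : Int) :
    d ∈ (SOIAltScan n CS init).2 ↔ d ∈ init ∨ pvRsp n CS d := by
  induction CS using List.reverseRecOn with
  | nil =>
    simp only [SOIAltScan, List.foldl_nil, pvRsp]
    constructor
    · exact fun h => Or.inl h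
    · rintro (h | ⟨i, j, -, hj, -⟩)
      · exact h
      · simp at hj
  | append_singleton l c ih =>
    rw [pvRspApp]
    have hmids := pvScanMids n (l ++ [c]) init (pvHd c)
    rw [pvScanStep] at hmids ⊢
    simp only [] at hmids ⊢
    by_cases hin : (if pvHd c = n then PySem.Set.add (SOIAltScan n l init).1 (pvTl c)
        else (SOIAltScan n l init).1).contains (pvHd c)
    · rw [if_pos hin, PySem.Set.mem_add, ih]
      constructor
      · rintro (⟨h | h⟩ | h)
        · exact Or.inl h
        · exact Or.inr (Or.inl h)
        · exact Or.inr (Or.inr ⟨hmids.mp ((PySem.Set.contains_iff _ _).mp hin), h.symm⟩)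
      · rintro (h | (h | ⟨-, h⟩))
        · exact Or.inl (Or.inl h)
        · exact Or.inl (Or.inr h)
        · exact Or.inr h.symm
    · rw [if_neg hin, ih]
      constructor
      · rintro (h | h)
        · exact Or.inl h
        · exact Or.inr (Or.inl h)
      · rintro (h | (h | ⟨h1, -⟩))
        · exact Or.inl h
        · exact Or.inr h
        · exact absurd ((PySem.Set.contains_iff _ _).mpr (hmids.mpr h1)) hin

theorem pvScanNodup (n : Int) (CS : List (List Int)) (init : PySem.Set Int) (h : init.Nodup) :
    (SOIAltScan n CS init).2.Nodup := by
  induction CS using List.reverseRecOn with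
  | nil => exact h
  | append_singleton l c ih =>
    rw [pvScanStep]
    simp only []
    split_ifs <;> first | exact PySem.Set.nodup_add _ _ ih | exact ih

-- ===== VERDICT (by name: the statement is the Claim_ definition above) =====
theorem SetOfInfluence_spec : Claim_equal_SetOfInfluence := by
  intro n CS _ _
  unfold Spec_SetOfInfluence SetOfInfluence SetOfInfluence_alt
  simp only []
  apply PySem.List.sorted_eq_sorted_of_perm _ _ _ (fun a b h => h)
  have hA := pvNodupFoldlCondAdd (SOIWeak CS) (fun w => [n, pvTl w] ∈ SOIWeak CS) pvTl
    ((SOIStrong CS).foldl (fun acc s =>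
      if PySem.Set.contains s n then PySem.Set.update acc s else acc) PySem.Set.empty)
    (by rw [pvBaseAEq]; exact PySem.Set.nodup_ofList _)
  beta_reduce at hA
  have hB := pvScanNodup n CS (CS.foldl (fun res c =>
      if n = pvHd c ∨ n = pvTl c then PySem.Set.add (PySem.Set.add res (pvHd c)) (pvTl c) else res)
      PySem.Set.empty) (by rw [pvBaseBEq]; exact PySem.Set.nodup_ofList _)
  rw [List.perm_ext_iff_of_nodup hA hB]
  intro x
  rw [pvMemA, pvScanTwo, pvBaseBEq]
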